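-- pv_equiv track=rewrite | github.com/muletownlaw/muletownlaw-legal-docs | api/generate-will-v2.py | format_children_list
-- ===== SOURCE A (Python) =====
-- def format_children_list(children):
--     """Format children array into text"""
--     if not children:
--         return ""
--
--     if len(children) == 1:
--         child = children[0]
--         return f"{child['name']}, born {child['dob']}"
--
--     result = []
--     for i, child in enumerate(children):
--         if i == len(children) - 1:
--             result.append(f"and {child['name']}, born {child['dob']}")
--         else:
--             result.append(f"{child['name']}, born {child['dob']}")
--
--     return ", ".join(result)
-- ===== SOURCE B (Python) =====
-- def format_children_list(children):
--     """Format children array into text"""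
--     if not children:
--         return ""
--     if len(children) == 1:
--         return f"{children[0]['name']}, born {children[0]['dob']}"
--     return _with_final_and(children)
--
--
-- def _with_final_and(cs):
--     # cs is nonempty: the last element is prefixed with "and ",
--     # earlier elements are stitched on recursively with ", ".
--     head = cs[0]
--     text = f"{head['name']}, born {head['dob']}"
--     if len(cs) == 1:
--         return "and " + text
--     return text + ", " + _with_final_and(cs[1:])
-- ===== Notes on version B (the rewrite author's own statement) =====
-- stated objective: alternative
-- what changed: B replaces A's enumerate loop that builds a list and joins it by a direct recursion on the list structure that concatenates the string head-first, prefixing 'and ' at the base case (the last child); no intermediate list, no index arithmetic, no join.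
import Mathlib
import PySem

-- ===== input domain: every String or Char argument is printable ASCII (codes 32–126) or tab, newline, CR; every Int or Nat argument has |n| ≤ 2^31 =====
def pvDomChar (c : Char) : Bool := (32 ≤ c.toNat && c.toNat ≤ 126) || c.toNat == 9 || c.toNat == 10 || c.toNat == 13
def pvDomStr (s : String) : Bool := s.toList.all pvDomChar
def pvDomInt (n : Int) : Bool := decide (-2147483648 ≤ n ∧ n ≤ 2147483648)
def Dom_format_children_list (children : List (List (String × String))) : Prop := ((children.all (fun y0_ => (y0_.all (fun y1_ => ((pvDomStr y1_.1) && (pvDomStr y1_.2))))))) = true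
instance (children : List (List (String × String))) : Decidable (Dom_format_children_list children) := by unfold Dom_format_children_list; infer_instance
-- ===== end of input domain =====

-- B replaces A's enumerate loop + list + join by a direct recursion on the list that
-- concatenates the string head-first, prefixing "and " at the base case; objective: alternative.

-- ===== PORT A =====
-- dict lookup child['key']: first match in the association list (convention); none = KeyError,
-- excluded by Pre_ below, where the port's "" default is never reached.
def pvGetKey (c : List (String × String)) (k : String) : String :=
  ((c.find? (fun p => p.1 == k)).map (·.2)).getD ""

-- f"{child['name']}, born {child['dob']}"
def pvFmtChild (c : List (String × String)) : String :=
  pvGetKey c "name" ++ ", born " ++ pvGetKey c "dob"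

def format_children_list (children : List (List (String × String))) : String :=
  if children = [] then ""
  else if children.length = 1 then
    pvFmtChild (PySem.List.pyGetD children 0 [])
  else
    let result : List String :=
      (PySem.List.enumerate children 0).foldl (fun acc ic =>
        if ic.1 = (children.length : Int) - 1 then acc ++ ["and " ++ pvFmtChild ic.2]
        else acc ++ [pvFmtChild ic.2]) []
    PySem.Str.join ", " result

-- ===== PORT B =====
-- _with_final_and: recursion on the list; [] branch is unreachable (always called nonempty).
def pvWithFinalAnd : List (List (String × String)) → String
  | [] => ""
  | [c] => "and " ++ pvFmtChild c
  | c :: c2 :: rest => pvFmtChild c ++ ", " ++ pvWithFinalAnd (c2 :: rest)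

def format_children_list_alt (children : List (List (String × String))) : String :=
  if children = [] then ""
  else if children.length = 1 then
    pvFmtChild (PySem.List.pyGetD children 0 [])
  else pvWithFinalAnd children

-- ===== PRECONDITION & SPEC =====
-- Pre_ excludes exactly the inputs where Python A raises KeyError (a child without a
-- 'name' or 'dob' key); Python B raises there too.
def Pre_format_children_list (children : List (List (String × String))) : Prop :=
  (children.all (fun c => c.any (fun p => p.1 == "name") && c.any (fun p => p.1 == "dob"))) = true
instance (children : List (List (String × String))) : Decidable (Pre_format_children_list children) := by unfold Pre_format_children_list; infer_instance
def pvWitness_format_children_list : (List (List (String × String))) :=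
  [[("name", "Ann"), ("dob", "2001-01-01")], [("name", "Bob"), ("dob", "2003-05-06")]]
def Spec_format_children_list (children : List (List (String × String))) (out : String) : Prop := out = format_children_list_alt children
instance (children : List (List (String × String))) (out : String) : Decidable (Spec_format_children_list children out) := by unfold Spec_format_children_list; infer_instance

-- ===== CLAIM (what is proved, stated in full; the proofs are below) =====
def Claim_equal_format_children_list : Prop := ∀ (children : List (List (String × String))), Dom_format_children_list children → Pre_format_children_list children → Spec_format_children_list children (format_children_list children)

-- ===== LEMMAS AND PROOFS =====

-- A's enumerate loop, mapped: every index of the prefix misses the last-index test.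
theorem pv_map_enum {α : Type} (f g : α → String) (x : α) :
    ∀ (xs : List α) (s n : Int), n = s + xs.length →
      (PySem.List.enumerate (xs ++ [x]) s).map
        (fun ic => if ic.1 = n then g ic.2 else f ic.2) = xs.map f ++ [g x] := by
  intro xs
  induction xs with
  | nil =>
    intro s n hn
    subst hn
    simp [PySem.List.enumerate]
  | cons a xs ih =>
    intro s n hn
    have hne : ¬ (s = n) := by simp at hn; omega
    simp only [List.cons_append, PySem.List.enumerate, List.map_cons, hne, if_false]
    rw [ih (s + 1) n (by simp at hn ⊢; omega)]

-- strings are equal when their character lists are.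
theorem pv_str_ext (s t : String) (h : s.toList = t.toList) : s = t := by
  have := congrArg String.ofList h
  simpa using this

-- join with a two-or-more element list peels the head (String level).
theorem pv_str_join_cons_cons (sep a b : String) (t : List String) :
    PySem.Str.join sep (a :: b :: t) = a ++ sep ++ PySem.Str.join sep (b :: t) := by
  apply pv_str_ext
  simp [PySem.Str.toList_join, PySem.Chars.join_cons_cons]

-- B's recursion computes exactly A's joined list.
theorem pv_go_eq :
    ∀ (xs : List (List (String × String))) (x : List (String × String)),
      pvWithFinalAnd (xs ++ [x])
        = PySem.Str.join ", " (xs.map pvFmtChild ++ ["and " ++ pvFmtChild x]) := by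
  intro xs
  induction xs with
  | nil =>
    intro x
    apply pv_str_ext
    simp [pvWithFinalAnd, PySem.Str.toList_join, PySem.Chars.join_singleton]
  | cons a xs ih =>
    intro x
    rcases xs with _ | ⟨b, t⟩
    · rw [show ([a] ++ [x]) = a :: x :: ([] : List (List (String × String))) from rfl]
      rw [pvWithFinalAnd, show pvWithFinalAnd [x] = pvWithFinalAnd ([] ++ [x]) from rfl, ih x]
      simp only [List.map_cons, List.map_nil, List.nil_append, List.cons_append]
      rw [pv_str_join_cons_cons]
    · rw [show ((a :: b :: t) ++ [x]) = a :: ((b :: t) ++ [x]) from rfl]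
      have hcons : (b :: t) ++ [x] = b :: (t ++ [x]) := rfl
      rw [hcons, pvWithFinalAnd, ← hcons, ih x]
      simp only [List.map_cons, List.cons_append]
      rcases ht : t.map pvFmtChild ++ ["and " ++ pvFmtChild x] with _ | ⟨u, us⟩
      · simp at ht
      · rw [pv_str_join_cons_cons, pv_str_join_cons_cons, pv_str_join_cons_cons]

-- ===== VERDICT (by name: the statement is the Claim_ definition above) =====
theorem format_children_list_spec : Claim_equal_format_children_list := by
  intro children _ _
  unfold Spec_format_children_list format_children_list format_children_list_alt
  rcases h : children with _ | ⟨c, rest⟩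
  · simp
  · rcases hr : rest with _ | ⟨c2, rest2⟩
    · simp
    · -- length ≥ 2 : write children = xs ++ [x]
      have hne : (c :: c2 :: rest2) ≠ [] := by simp
      obtain ⟨xs, x, hsplit⟩ : ∃ xs x, c :: c2 :: rest2 = xs ++ [x] :=
        ⟨(c :: c2 :: rest2).dropLast, (c :: c2 :: rest2).getLast hne,
          (List.dropLast_append_getLast hne).symm⟩
      have hxs : xs ≠ [] := by
        intro hx; rw [hx] at hsplit; simp at hsplit
      rw [hsplit]
      have hlen2 : (xs ++ [x]).length ≠ 1 := by
        rcases xs with _ | ⟨y, ys⟩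
        · exact absurd rfl hxs
        · simp
      have hnil : (xs ++ [x]) ≠ [] := by simp
      simp only [hnil, hlen2, if_false]
      -- A side: foldl → map over enumerate → prefix map ++ ["and " ++ last]
      rw [show (fun (acc : List String) (ic : Int × List (String × String)) =>
              if ic.1 = ((xs ++ [x]).length : Int) - 1 then acc ++ ["and " ++ pvFmtChild ic.2]
              else acc ++ [pvFmtChild ic.2])
            = (fun acc ic => acc ++ [if ic.1 = ((xs ++ [x]).length : Int) - 1
                then "and " ++ pvFmtChild ic.2 else pvFmtChild ic.2]) from by
          funext acc ic; split_ifs <;> rfl]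
      rw [PySem.List.foldl_append_singleton_eq_map
        (fun ic => if ic.1 = ((xs ++ [x]).length : Int) - 1 then "and " ++ pvFmtChild ic.2
                   else pvFmtChild ic.2) (PySem.List.enumerate (xs ++ [x]) 0) []]
      rw [pv_map_enum (fun c => pvFmtChild c) (fun c => "and " ++ pvFmtChild c) x xs 0
        (((xs ++ [x]).length : Int) - 1) (by simp)]
      rw [List.nil_append]
      exact (pv_go_eq xs x).symm
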